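-- pv_equiv track=rewrite | github.com/hanby-choi/Algorithm-Study | 백준/Gold/2504. 괄호의 값/괄호의 값.py | solution
-- ===== SOURCE A (Python) =====
-- def solution(brackets):
-- 	temp, ans = 1, 0
-- 	stack = []
-- 	for i, b in enumerate(brackets):
-- 		if b == '(':
-- 			stack.append(b)
-- 			temp *= 2
-- 		elif b == '[':
-- 			stack.append(b)
-- 			temp *= 3
-- 		elif b == ')':
-- 			if not stack or stack[-1] == '[':
-- 				return 0
-- 			if brackets[i-1] == '(':
-- 				ans += temp
-- 			stack.pop()
-- 			temp //= 2
-- 		else: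
-- 			if not stack or stack[-1] == '(':
-- 				return 0
-- 			if brackets[i-1] == '[':
-- 				ans += temp
-- 			stack.pop()
-- 			temp //= 3
-- 	if stack:
-- 		return 0
-- 	return ans
-- ===== SOURCE B (Python) =====
-- def solution(brackets):
--     # value stack: '(' / '[' markers and computed int values
--     stack = []
--     for b in brackets:
--         if b == '(' or b == '[':
--             stack.append(b)
--         else:
--             base = 2 if b == ')' else 3
--             s = 0
--             while stack and isinstance(stack[-1], int):
--                 s += stack.pop()
--             if not stack or stack[-1] != ('(' if base == 2 else '['):
--                 return 0
--             stack.pop()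
--             stack.append(base * s if s else base)
--     if any(isinstance(x, str) for x in stack):
--         return 0
--     return sum(stack)
-- ===== Notes on version B (the rewrite author's own statement) =====
-- stated objective: alternative
-- what changed: Replaces A's running multiplier, open-bracket stack and previous-character test by a single value stack that reduces every closed pair to an integer (empty pair -> base 2/3, otherwise base times the sum of inner values) and sums the stack at the end.
import Mathlib
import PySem

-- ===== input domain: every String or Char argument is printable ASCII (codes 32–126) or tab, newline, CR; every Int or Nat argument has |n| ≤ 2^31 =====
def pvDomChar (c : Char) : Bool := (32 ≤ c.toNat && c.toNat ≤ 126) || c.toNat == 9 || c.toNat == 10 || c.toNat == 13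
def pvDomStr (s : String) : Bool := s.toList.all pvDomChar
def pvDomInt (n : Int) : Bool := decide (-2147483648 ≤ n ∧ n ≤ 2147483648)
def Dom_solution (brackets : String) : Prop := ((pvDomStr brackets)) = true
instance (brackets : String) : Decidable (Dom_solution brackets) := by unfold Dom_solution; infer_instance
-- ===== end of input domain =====

-- B replaces A's running multiplier (temp) and previous-character test by a value stack that
-- reduces each closed pair to an integer; same result, a different decomposition (alternative).

-- ===== PORT A =====
-- Transliteration of A's for-loop: structural recursion over the remaining characters, the
-- enumerate counter carried as i : Int, early `return 0` as a direct result; the Python list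
-- `stack` is kept top-first (append = cons, stack[-1] = head, pop = tail).
def solutionGo (brackets : String) (l : List Char) (i temp ans : Int) (stack : List Char) : Int :=
  match l with
  | [] => if stack ≠ [] then 0 else ans
  | b :: rest =>
    if b = '(' then solutionGo brackets rest (i + 1) (temp * 2) ans ('(' :: stack)
    else if b = '[' then solutionGo brackets rest (i + 1) (temp * 3) ans ('[' :: stack)
    else if b = ')' then
      match stack with
      | [] => 0
      | t :: s' =>
        if t = '[' then 0
        else solutionGo brackets rest (i + 1) (PySem.Int.floordiv temp 2)
          (if PySem.Str.pyGet? brackets (i - 1) = some '(' then ans + temp else ans) s'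
    else
      match stack with
      | [] => 0
      | t :: s' =>
        if t = '(' then 0
        else solutionGo brackets rest (i + 1) (PySem.Int.floordiv temp 3)
          (if PySem.Str.pyGet? brackets (i - 1) = some '[' then ans + temp else ans) s'

def solution (brackets : String) : Int :=
  solutionGo brackets brackets.toList 0 1 0 []

-- ===== PORT B =====
-- The value stack holds open markers and computed integer values (Python: strs and ints).
inductive PItem : Type where
  | open2 : PItem            -- '('
  | open3 : PItem            -- '['
  | val : Int → PItem
deriving DecidableEq, Repr

def pitemIsMarker : PItem → Bool
  | PItem.val _ => false
  | _ => true

-- the `while stack and isinstance(stack[-1], int): s += stack.pop()` loop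
def popVals : List PItem → Int × List PItem
  | PItem.val v :: r => ((popVals r).1 + v, (popVals r).2)
  | r => (0, r)

def sumVals : List PItem → Int
  | [] => 0
  | PItem.val v :: r => v + sumVals r
  | _ :: r => sumVals r

def solutionAltGo (l : List Char) (items : List PItem) : Int :=
  match l with
  | [] => if items.any pitemIsMarker then 0 else sumVals items
  | b :: rest =>
    if b = '(' then solutionAltGo rest (PItem.open2 :: items)
    else if b = '[' then solutionAltGo rest (PItem.open3 :: items)
    else
      let base : Int := if b = ')' then 2 else 3
      let pr := popVals items
      match pr.2 with
      | PItem.open2 :: r =>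
          if base = 2 then
            solutionAltGo rest (PItem.val (if pr.1 = 0 then base else base * pr.1) :: r)
          else 0
      | PItem.open3 :: r =>
          if base = 3 then
            solutionAltGo rest (PItem.val (if pr.1 = 0 then base else base * pr.1) :: r)
          else 0
      | _ => 0

def solution_alt (brackets : String) : Int :=
  solutionAltGo brackets.toList []

-- ===== PRECONDITION & SPEC =====
def Spec_solution (brackets : String) (out : Int) : Prop := out = solution_alt brackets
instance (brackets : String) (out : Int) : Decidable (Spec_solution brackets out) := by unfold Spec_solution; infer_instance

-- ===== CLAIM (what is proved, stated in full; the proofs are below) =====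
def Claim_equal_solution : Prop := ∀ (brackets : String), Dom_solution brackets → Spec_solution brackets (solution brackets)

-- ===== LEMMAS AND PROOFS =====

-- markers on the value stack, top first (= A's stack, top first)
def markersOf : List PItem → List Char
  | [] => []
  | PItem.open2 :: r => '(' :: markersOf r
  | PItem.open3 :: r => '[' :: markersOf r
  | PItem.val _ :: r => markersOf r

-- product of the weights of all markers (= A's temp)
def prodM : List PItem → Int
  | [] => 1
  | PItem.open2 :: r => 2 * prodM r
  | PItem.open3 :: r => 3 * prodM r
  | PItem.val _ :: r => prodM r

-- each value weighted by the markers below it (= A's ans)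
def wsum : List PItem → Int
  | [] => 0
  | PItem.val v :: r => v * prodM r + wsum r
  | _ :: r => wsum r

-- relation between the character last processed and the resulting top of the value stack
def topRel (p : Char) (it : PItem) : Prop :=
  if p = '(' then it = PItem.open2
  else if p = '[' then it = PItem.open3
  else ∃ v, it = PItem.val v

def Shape : List Char → List PItem → Prop
  | [], items => items = []
  | p :: _, it :: _ => topRel p it
  | _ :: _, [] => False

def AllPos (items : List PItem) : Prop := ∀ v, PItem.val v ∈ items → 0 < v

lemma popVals_facts (items : List PItem) :
    markersOf (popVals items).2 = markersOf items ∧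
    prodM (popVals items).2 = prodM items ∧
    wsum items = (popVals items).1 * prodM items + wsum (popVals items).2 ∧
    (AllPos items → AllPos (popVals items).2 ∧ 0 ≤ (popVals items).1 ∧
      ((popVals items).1 = 0 → (popVals items).2 = items)) := by
  induction items with
  | nil => simp [popVals, markersOf, prodM, wsum, AllPos]
  | cons it r ih =>
    cases it with
    | val v =>
      obtain ⟨h1, h2, h3, h4⟩ := ih
      refine ⟨by simpa [popVals, markersOf] using h1, by simpa [popVals, prodM] using h2, ?_, ?_⟩
      · simp only [popVals, wsum]
        rw [h3]
        have : prodM (popVals r).2 = prodM r := h2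
        ring_nf
        rw [show prodM (PItem.val v :: r) = prodM r from rfl]
        nlinarith [h2]
      · intro hap
        have hv : 0 < v := hap v (by simp)
        have hr : AllPos r := fun w hw => hap w (by simp [hw])
        obtain ⟨p1, p2, p3⟩ := h4 hr
        refine ⟨by simpa [popVals] using p1, by simp [popVals]; omega, ?_⟩
        intro h0
        simp [popVals] at h0
        omega
    | open2 => simp [popVals, markersOf, prodM, wsum]
    | open3 => simp [popVals, markersOf, prodM, wsum]

lemma popVals_nonval (items : List PItem)
    (h : ∀ v r, items ≠ PItem.val v :: r) : popVals items = (0, items) := by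
  match items with
  | [] => rfl
  | PItem.open2 :: r => rfl
  | PItem.open3 :: r => rfl
  | PItem.val v :: r => exact absurd rfl (h v r)

lemma popVals_no_val_head (items : List PItem) (v : Int) (r : List PItem) :
    (popVals items).2 ≠ PItem.val v :: r := by
  induction items with
  | nil => simp [popVals]
  | cons it t ih =>
    cases it with
    | val w => simpa [popVals] using ih
    | open2 => simp [popVals]
    | open3 => simp [popVals]

lemma markersOf_eq_nil_iff (items : List PItem) :
    markersOf items = [] ↔ items.any pitemIsMarker = false := by
  induction items with
  | nil => simp [markersOf]
  | cons it r ih =>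
    cases it with
    | val v => simpa [markersOf, pitemIsMarker] using ih
    | open2 => simp [markersOf, pitemIsMarker]
    | open3 => simp [markersOf, pitemIsMarker]

lemma no_markers (items : List PItem) (h : markersOf items = []) :
    items.any pitemIsMarker = false ∧ prodM items = 1 ∧ wsum items = sumVals items := by
  induction items with
  | nil => simp [prodM, wsum, sumVals]
  | cons it r ih =>
    cases it with
    | val v =>
      obtain ⟨h1, h2, h3⟩ := ih (by simpa [markersOf] using h)
      exact ⟨by simpa [pitemIsMarker] using h1, by simpa [prodM] using h2,
        by simp [wsum, sumVals, h2, h3]⟩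
    | open2 => simp [markersOf] at h
    | open3 => simp [markersOf] at h

lemma pyGet_prev (brackets : String) (p : Char) (ps suf : List Char)
    (h : brackets.toList = (p :: ps).reverse ++ suf) :
    PySem.Str.pyGet? brackets ((((p :: ps).length : Nat) : Int) - 1) = some p := by
  have hidx : ((((p :: ps).length : Nat) : Int) - 1) = ((ps.length : Nat) : Int) := by
    push_cast [List.length_cons]; ring
  rw [hidx, PySem.Str.pyGet?_natCast, h]
  have : (p :: ps).reverse = ps.reverse ++ [p] := by simp
  rw [this, List.append_assoc]
  rw [List.getElem?_append_right (by simp)]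
  simp

lemma main_lemma (brackets : String) :
    ∀ (suf pre : List Char) (items : List PItem),
      brackets.toList = pre.reverse ++ suf →
      Shape pre items → AllPos items →
      solutionGo brackets suf (pre.length : Nat) (prodM items) (wsum items) (markersOf items)
        = solutionAltGo suf items := by
  intro suf
  induction suf with
  | nil =>
    intro pre items h hshape hpos
    rcases hany : items.any pitemIsMarker with _ | _
    · obtain ⟨h1, h2, h3⟩ := no_markers items ((markersOf_eq_nil_iff items).2 hany)
      simp [solutionGo, solutionAltGo, (markersOf_eq_nil_iff items).2 hany, hany, h3]
    · have hne : markersOf items ≠ [] := by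
        intro hc
        rw [(markersOf_eq_nil_iff items).1 hc] at hany
        exact Bool.false_ne_true hany
      simp [solutionGo, solutionAltGo, hne, hany]
  | cons b rest ih =>
    intro pre items h hshape hpos
    have h' : brackets.toList = (b :: pre).reverse ++ rest := by
      rw [h]; simp
    have hlen : (((b :: pre).length : Nat) : Int) = ((pre.length : Nat) : Int) + 1 := by
      push_cast [List.length_cons]; ring
    by_cases hb1 : b = '('
    · subst hb1
      have ih' := ih ('(' :: pre) (PItem.open2 :: items) h'
        (by simp [Shape, topRel])
        (by intro v hv; exact hpos v (by simpa using hv))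
      rw [solutionGo.eq_def, solutionAltGo.eq_def]
      rw [show prodM items * 2 = prodM (PItem.open2 :: items) from by simp [prodM]; ring,
        show wsum items = wsum (PItem.open2 :: items) from rfl,
        show ('(' :: markersOf items) = markersOf (PItem.open2 :: items) from rfl,
        ← hlen]
      exact ih'
    · by_cases hb2 : b = '['
      · subst hb2
        have ih' := ih ('[' :: pre) (PItem.open3 :: items) h'
          (by simp [Shape, topRel])
          (by intro v hv; exact hpos v (by simpa using hv))
        rw [solutionGo.eq_def, solutionAltGo.eq_def]
        simp only [if_neg (by decide : ¬('[' = '('))]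
        rw [show prodM items * 3 = prodM (PItem.open3 :: items) from by simp [prodM]; ring,
          show wsum items = wsum (PItem.open3 :: items) from rfl,
          show ('[' :: markersOf items) = markersOf (PItem.open3 :: items) from rfl,
          ← hlen]
        exact ih'
      · -- closing character: b = ')' uses base 2 / marker '('; any other b uses base 3 / marker '['
        obtain ⟨hm, hp, hw, hap⟩ := popVals_facts items
        obtain ⟨hap1, hap2, hap3⟩ := hap hpos
        rcases hr : (popVals items).2 with _ | ⟨it, rr⟩
        · -- no marker below the popped values: both return 0
          have hmi : markersOf items = [] := by rw [← hm, hr, markersOf]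
          by_cases hb3 : b = ')'
          · subst hb3; simp [solutionGo.eq_def, solutionAltGo.eq_def, hmi, hb1, hr]
          · simp [solutionGo.eq_def, solutionAltGo.eq_def, hmi, hb1, hb2, hb3, hr]
        · cases it with
          | val v => exact absurd hr (popVals_no_val_head items v rr)
          | open2 =>
            have hmi : markersOf items = '(' :: markersOf rr := by
              rw [← hm, hr, markersOf]
            have hpi : prodM items = 2 * prodM rr := by
              rw [← hp, hr, prodM]
            have hine : items ≠ [] := by
              intro hc; rw [hc] at hr; simp [popVals] at hr
            obtain ⟨p, ps, hpre⟩ : ∃ p ps, pre = p :: ps := by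
              cases pre with
              | nil => exact absurd (hshape : items = []) hine
              | cons p ps => exact ⟨p, ps, rfl⟩
            subst hpre
            have hprev := pyGet_prev brackets p ps (b :: rest) h
            obtain ⟨it0, its, hitems⟩ : ∃ it0 its, items = it0 :: its := by
              cases items with
              | nil => exact absurd rfl hine
              | cons a as => exact ⟨a, as, rfl⟩
            have htop : topRel p it0 := by rw [hitems] at hshape; exact hshape
            have hsz : p = '(' ↔ (popVals items).1 = 0 := by
              constructor
              · intro hpc
                have hit0 : it0 = PItem.open2 := by
                  rw [topRel, if_pos hpc] at htop; exact htop
                have : popVals items = (0, items) := by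
                  apply popVals_nonval
                  intro w rrw hcc
                  rw [hitems, hit0] at hcc
                  exact PItem.noConfusion (List.head_eq_of_cons_eq hcc)
                rw [this]
              · intro hs0
                have hri : items = PItem.open2 :: rr := by rw [← hap3 hs0, hr]
                have hit0 : it0 = PItem.open2 := by
                  rw [hitems] at hri; exact List.head_eq_of_cons_eq hri
                rw [topRel] at htop
                split_ifs at htop with c1 c2
                · exact c1
                · rw [hit0] at htop; exact absurd htop (by decide)
                · obtain ⟨w, hww⟩ := htop; rw [hit0] at hww; exact PItem.noConfusion hww
            have hrr_pos : AllPos rr := by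
              intro w hww; exact (hr ▸ hap1) w (by simp [hww])
            have hfd : PySem.Int.floordiv (2 * prodM rr) 2 = prodM rr := by
              rw [PySem.Int.floordiv_eq_ediv_of_pos (by norm_num)]
              exact Int.mul_ediv_cancel_left _ (by norm_num)
            by_cases hb3 : b = ')'
            · subst hb3
              by_cases hs : (popVals items).1 = 0
              · have hpc : p = '(' := hsz.2 hs
                have hri : items = PItem.open2 :: rr := by rw [← hap3 hs, hr]
                subst hpc
                have ih' := ih (')' :: '(' :: ps) (PItem.val 2 :: rr) h'
                  (by simp [Shape, topRel])
                  (by intro w hww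
                      rcases (by simpa using hww : w = 2 ∨ PItem.val w ∈ rr) with hc | hc
                      · omega
                      · exact hrr_pos w hc)
                have e2 : wsum (PItem.val 2 :: rr) = wsum items + 2 * prodM rr := by
                  rw [hri]; simp [wsum]; ring
                have e3 : prodM (PItem.val 2 :: rr) = prodM rr := rfl
                have e4 : markersOf (PItem.val 2 :: rr) = markersOf rr := rfl
                simp at hprev
                rw [solutionGo.eq_def, solutionAltGo.eq_def]
                simpa [e2, e3, e4, hmi, hr, hprev, hs, hpi, hfd] using ih'
              · have hpc : p ≠ '(' := fun hc => hs (hsz.1 hc)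
                have hspos : 0 < (popVals items).1 := lt_of_le_of_ne hap2 (Ne.symm hs)
                have ih' := ih (')' :: p :: ps) (PItem.val (2 * (popVals items).1) :: rr) h'
                  (by simp [Shape, topRel])
                  (by intro w hww
                      rcases (by simpa using hww : w = 2 * (popVals items).1 ∨ PItem.val w ∈ rr) with hc | hc
                      · omega
                      · exact hrr_pos w hc)
                have e2 : wsum (PItem.val (2 * (popVals items).1) :: rr) = wsum items := by
                  rw [hw, hr]; simp [wsum, hpi]; ring
                have e3 : prodM (PItem.val (2 * (popVals items).1) :: rr) = prodM rr := rfl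
                have e4 : markersOf (PItem.val (2 * (popVals items).1) :: rr) = markersOf rr := rfl
                simp at hprev
                rw [solutionGo.eq_def, solutionAltGo.eq_def]
                simpa [e2, e3, e4, hmi, hr, hprev, hs, hpi, hfd, hpc] using ih'
            · -- stray closer handled as ']' by both: base 3 against marker '(' fails
              rw [solutionGo.eq_def, solutionAltGo.eq_def]
              simp only [hmi, hr]
              simp [hb1, hb2, hb3]
          | open3 =>
            have hmi : markersOf items = '[' :: markersOf rr := by
              rw [← hm, hr, markersOf]
            have hpi : prodM items = 3 * prodM rr := by
              rw [← hp, hr, prodM]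
            have hine : items ≠ [] := by
              intro hc; rw [hc] at hr; simp [popVals] at hr
            obtain ⟨p, ps, hpre⟩ : ∃ p ps, pre = p :: ps := by
              cases pre with
              | nil => exact absurd (hshape : items = []) hine
              | cons p ps => exact ⟨p, ps, rfl⟩
            subst hpre
            have hprev := pyGet_prev brackets p ps (b :: rest) h
            obtain ⟨it0, its, hitems⟩ : ∃ it0 its, items = it0 :: its := by
              cases items with
              | nil => exact absurd rfl hine
              | cons a as => exact ⟨a, as, rfl⟩
            have htop : topRel p it0 := by rw [hitems] at hshape; exact hshape
            have hsz : p = '[' ↔ (popVals items).1 = 0 := by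
              constructor
              · intro hpc
                have hit0 : it0 = PItem.open3 := by
                  rw [topRel, if_neg (by rw [hpc]; decide), if_pos hpc] at htop; exact htop
                have : popVals items = (0, items) := by
                  apply popVals_nonval
                  intro w rrw hcc
                  rw [hitems, hit0] at hcc
                  exact PItem.noConfusion (List.head_eq_of_cons_eq hcc)
                rw [this]
              · intro hs0
                have hri : items = PItem.open3 :: rr := by rw [← hap3 hs0, hr]
                have hit0 : it0 = PItem.open3 := by
                  rw [hitems] at hri; exact List.head_eq_of_cons_eq hri
                rw [topRel] at htop
                split_ifs at htop with c1 c2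
                · rw [hit0] at htop; exact absurd htop (by decide)
                · exact c2
                · obtain ⟨w, hww⟩ := htop; rw [hit0] at hww; exact PItem.noConfusion hww
            have hrr_pos : AllPos rr := by
              intro w hww; exact (hr ▸ hap1) w (by simp [hww])
            have hfd : PySem.Int.floordiv (3 * prodM rr) 3 = prodM rr := by
              rw [PySem.Int.floordiv_eq_ediv_of_pos (by norm_num)]
              exact Int.mul_ediv_cancel_left _ (by norm_num)
            by_cases hb3 : b = ')'
            · -- ')' against marker '[': both return 0
              subst hb3
              rw [solutionGo.eq_def, solutionAltGo.eq_def]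
              simp only [hmi, hr]
              simp
            · by_cases hs : (popVals items).1 = 0
              · have hpc : p = '[' := hsz.2 hs
                have hri : items = PItem.open3 :: rr := by rw [← hap3 hs, hr]
                subst hpc
                have ih' := ih (b :: '[' :: ps) (PItem.val 3 :: rr) h'
                  (by simp [Shape, topRel, hb1, hb2])
                  (by intro w hww
                      rcases (by simpa using hww : w = 3 ∨ PItem.val w ∈ rr) with hc | hc
                      · omega
                      · exact hrr_pos w hc)
                have e2 : wsum (PItem.val 3 :: rr) = wsum items + 3 * prodM rr := by
                  rw [hri]; simp [wsum]; ring
                have e3 : prodM (PItem.val 3 :: rr) = prodM rr := rfl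
                have e4 : markersOf (PItem.val 3 :: rr) = markersOf rr := rfl
                simp at hprev
                rw [solutionGo.eq_def, solutionAltGo.eq_def]
                simpa [e2, e3, e4, hmi, hr, hprev, hs, hpi, hfd, hb1, hb2, hb3] using ih'
              · have hpc : p ≠ '[' := fun hc => hs (hsz.1 hc)
                have hspos : 0 < (popVals items).1 := lt_of_le_of_ne hap2 (Ne.symm hs)
                have ih' := ih (b :: p :: ps) (PItem.val (3 * (popVals items).1) :: rr) h'
                  (by simp [Shape, topRel, hb1, hb2])
                  (by intro w hww
                      rcases (by simpa using hww : w = 3 * (popVals items).1 ∨ PItem.val w ∈ rr) with hc | hc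
                      · omega
                      · exact hrr_pos w hc)
                have e2 : wsum (PItem.val (3 * (popVals items).1) :: rr) = wsum items := by
                  rw [hw, hr]; simp [wsum, hpi]; ring
                have e3 : prodM (PItem.val (3 * (popVals items).1) :: rr) = prodM rr := rfl
                have e4 : markersOf (PItem.val (3 * (popVals items).1) :: rr) = markersOf rr := rfl
                simp at hprev
                rw [solutionGo.eq_def, solutionAltGo.eq_def]
                simpa [e2, e3, e4, hmi, hr, hprev, hs, hpi, hfd, hb1, hb2, hb3, hpc] using ih'

-- ===== VERDICT (by name: the statement is the Claim_ definition above) =====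
theorem solution_spec : Claim_equal_solution := by
  intro brackets _
  unfold Spec_solution solution solution_alt
  have := main_lemma brackets brackets.toList [] [] (by simp) (by simp [Shape]) (by intro v h; simp at h)
  simpa [markersOf, prodM, wsum] using this
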